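-- pv_equiv track=rewrite | github.com/WooJin1993/coding_test | 20th/crane-claw-machine-game/solution.py | solution
-- ===== SOURCE A (Python) =====
-- from collections import deque
-- from collections import deque
--
-- def solution(board, moves):
--     board = [deque(filter(lambda x: x > 0, col)) for col in zip(*board)]
--     basket = []
--     answer = 0
--
--     for move in moves:
--         if not (column := board[move - 1]):
--             continue
--
--         doll = column.popleft()
--
--         if basket and basket[-1] == doll:
--             basket.pop()
--             answer += 2
--         else:
--             basket.append(doll)
--
--     return answer
-- ===== SOURCE B (Python) =====
-- def solution(board, moves):
--     # Stage 1: one row sweep builds the per-column lists of dolls (no transpose).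
--     width = len(board[0]) if board else 0
--     cols = [[] for _ in range(width)]
--     for row in board:
--         for j, x in enumerate(row):
--             if x > 0:
--                 cols[j].append(x)
--     # Stage 2: decode the moves into the sequence of dolls actually picked,
--     # counting how often each column has been played instead of consuming lists.
--     taken = [0] * width
--     picked = []
--     for m in moves:
--         c = m - 1
--         if taken[c] < len(cols[c]):
--             picked.append(cols[c][taken[c]])
--             taken[c] += 1
--     # Stage 3: classic stack reduction of the picked sequence; the answer is
--     # the number of picked dolls that vanished, i.e. len(picked) - len(stack).
--     stack = []
--     for d in picked:
--         if stack and stack[-1] == d: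
--             stack.pop()
--         else:
--             stack.append(d)
--     return len(picked) - len(stack)
-- ===== Notes on version B (the rewrite author's own statement) =====
-- stated objective: alternative
-- what changed: Replaces A's single online loop over transposed deques by three staged passes: a row sweep building per-column doll lists, a counter-indexed decoding of the moves into the picked-doll sequence, and a stack reduction whose answer is computed as len(picked) - len(stack) instead of an answer accumulator.
-- outside the precondition, e.g. on solution([[5, 2], [5]], [0, 1]): A returns 2, B returns 0
import Mathlib
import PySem

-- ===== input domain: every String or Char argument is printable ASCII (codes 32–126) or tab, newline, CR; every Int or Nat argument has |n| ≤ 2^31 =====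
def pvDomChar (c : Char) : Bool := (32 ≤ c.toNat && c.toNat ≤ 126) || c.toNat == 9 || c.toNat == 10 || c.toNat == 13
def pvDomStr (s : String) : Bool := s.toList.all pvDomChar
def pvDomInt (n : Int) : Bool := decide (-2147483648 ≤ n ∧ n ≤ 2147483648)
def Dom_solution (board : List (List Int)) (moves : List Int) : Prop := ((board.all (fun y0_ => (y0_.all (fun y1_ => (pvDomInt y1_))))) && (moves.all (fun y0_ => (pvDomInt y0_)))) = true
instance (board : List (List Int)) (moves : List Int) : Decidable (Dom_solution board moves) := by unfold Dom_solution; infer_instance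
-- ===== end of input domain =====

-- B replaces A's single online loop over transposed filtered deques by three staged
-- passes: a row sweep building per-column doll lists, a counter-indexed decoding of the
-- moves into the picked-doll sequence, and a stack reduction with the answer computed
-- as len(picked) - len(stack).  Baskets/stacks are modelled head-first (list head =
-- Python's last element) in both ports.

-- ===== PORT A =====
-- number of columns produced by zip(*board): the minimum row length (0 for an empty board)
def pyMinRowLen : List (List Int) → Nat
  | [] => 0
  | [r] => r.length
  | r :: rs => Nat.min r.length (pyMinRowLen rs)

-- board = [deque(filter(lambda x: x > 0, col)) for col in zip(*board)]
-- (row.getD j 0 is exact: j is always below every row's length here)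
def aCols (board : List (List Int)) : List (List Int) :=
  (List.range (pyMinRowLen board)).map
    (fun j => (board.map (fun row => row.getD j 0)).filter (fun x => decide (0 < x)))

-- one iteration of A's `for move in moves` (state: columns, basket, answer);
-- pyGet? none = Python's IndexError on board[move-1], excluded by Pre_solution
def aStep (st : List (List Int) × List Int × Int) (move : Int) :
    List (List Int) × List Int × Int :=
  match PySem.List.pyGet? st.1 (move - 1) with
  | none => st
  | some col =>
    match col with
    | [] => st
    | doll :: rest =>
      let cols' := PySem.List.pySetD st.1 (move - 1) rest
      match st.2.1 with
      | top :: bs =>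
        if top = doll then (cols', bs, st.2.2 + 2)
        else (cols', doll :: top :: bs, st.2.2)
      | [] => (cols', [doll], st.2.2)

def solution (board : List (List Int)) (moves : List Int) : Int :=
  (moves.foldl aStep (aCols board, ([], 0))).2.2

-- ===== PORT B =====
-- body of B's inner `for j, x in enumerate(row): if x > 0: cols[j].append(x)`
def bCell (cs : List (List Int)) (jx : Int × Int) : List (List Int) :=
  if 0 < jx.2 then PySem.List.pySetD cs jx.1 (PySem.List.pyGetD cs jx.1 [] ++ [jx.2]) else cs

-- one row of B's stage-1 sweep
def bBuildRow (cs : List (List Int)) (row : List Int) : List (List Int) :=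
  (PySem.List.enumerate row 0).foldl bCell cs

-- one iteration of B's stage-2 loop (state: taken counters, picked dolls)
def bPick (cols : List (List Int)) (st : List Int × List Int) (m : Int) : List Int × List Int :=
  let c := m - 1
  let k := PySem.List.pyGetD st.1 c 0
  let col := PySem.List.pyGetD cols c []
  if k < (col.length : Int) then
    (PySem.List.pySetD st.1 c (k + 1), st.2 ++ [PySem.List.pyGetD col k 0])
  else st

-- B's stage-3 stack reduction step
def bMatch (stack : List Int) (d : Int) : List Int :=
  match stack with
  | top :: bs => if top = d then bs else d :: top :: bs
  | [] => [d]

def solution_alt (board : List (List Int)) (moves : List Int) : Int :=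
  let width := (board.headD []).length
  let cols := board.foldl bBuildRow (List.replicate width [])
  let st := moves.foldl (bPick cols) (List.replicate width (0 : Int), [])
  let stack := st.2.foldl bMatch []
  (st.2.length : Int) - (stack.length : Int)

-- ===== PRECONDITION & SPEC =====
-- Pre_ excludes (a) ragged boards, where A's zip(*board) silently truncates every row to the
-- shortest — an artefact of the transpose that B, sweeping whole rows, does not share —
-- and (b) moves whose column index move-1 falls outside [-width, width), where A raises IndexError.
def Pre_solution (board : List (List Int)) (moves : List Int) : Prop :=
  (∀ row ∈ board, row.length = (board.headD []).length) ∧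
  (∀ m ∈ moves, 1 - ((board.headD []).length : Int) ≤ m ∧ m ≤ ((board.headD []).length : Int))
instance (board : List (List Int)) (moves : List Int) : Decidable (Pre_solution board moves) := by
  unfold Pre_solution; infer_instance

def pvWitness_solution : List (List Int) × List Int := ([[0, 3], [2, 3]], [2, 2, 1])

def Spec_solution (board : List (List Int)) (moves : List Int) (out : Int) : Prop := out = solution_alt board moves
instance (board : List (List Int)) (moves : List Int) (out : Int) : Decidable (Spec_solution board moves out) := by unfold Spec_solution; infer_instance

-- ===== CLAIM (what is proved, stated in full; the proofs are below) =====
def Claim_equal_solution : Prop := ∀ (board : List (List Int)) (moves : List Int), Dom_solution board moves → Pre_solution board moves → Spec_solution board moves (solution board moves)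

-- ===== LEMMAS AND PROOFS =====

-- normalised (Python) index into a list of length w
def jnorm (w : Nat) (c : Int) : Nat := (if c < 0 then c + w else c).toNat

-- column j of the original board (getD j 0; exact for j below the row length)
def colv (board : List (List Int)) (j : Nat) : List Int :=
  board.map (fun row => row.getD j 0)

-- the filtered column j
def fcol (board : List (List Int)) (j : Nat) : List Int :=
  (colv board j).filter (fun x => decide (0 < x))

theorem jnorm_lt (w : Nat) (c : Int) (h1 : -(w:Int) ≤ c) (h2 : c < w) : jnorm w c < w := by
  unfold jnorm; split <;> omega

theorem pyGetD_norm {α : Type} (xs : List α) (c : Int) (d : α) (w : Nat) (hw : xs.length = w)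
    (h1 : -(w:Int) ≤ c) (h2 : c < w) : PySem.List.pyGetD xs c d = xs.getD (jnorm w c) d := by
  unfold jnorm
  by_cases hc : c < 0
  · simp only [PySem.List.pyGetD, PySem.List.pyGet?, PySem.List.pyIdx?, hw]
    rw [if_neg (by omega), if_pos (by omega), if_pos hc]
    have : w - (-c).toNat = (c + w).toNat := by omega
    simp [this, List.getD]
  · simp only [PySem.List.pyGetD, PySem.List.pyGet?, PySem.List.pyIdx?, hw]
    rw [if_pos (by omega), if_pos (by omega), if_neg hc]
    simp [List.getD]

theorem pySetD_norm {α : Type} (xs : List α) (c : Int) (v : α) (w : Nat) (hw : xs.length = w)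
    (h1 : -(w:Int) ≤ c) (h2 : c < w) : PySem.List.pySetD xs c v = xs.set (jnorm w c) v := by
  unfold jnorm
  by_cases hc : c < 0
  · simp only [PySem.List.pySetD, PySem.List.pySet?, PySem.List.pyIdx?, hw]
    rw [if_neg (by omega), if_pos (by omega), if_pos hc]
    have : w - (-c).toNat = (c + w).toNat := by omega
    simp [this]
  · simp only [PySem.List.pySetD, PySem.List.pySet?, PySem.List.pyIdx?, hw]
    rw [if_pos (by omega), if_pos (by omega), if_neg hc]
    simp

theorem pyGet?_norm {α : Type} (xs : List α) (c : Int) (d : α) (w : Nat) (hw : xs.length = w)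
    (h1 : -(w:Int) ≤ c) (h2 : c < w) : PySem.List.pyGet? xs c = some (xs.getD (jnorm w c) d) := by
  have := pyGetD_norm xs c d w hw h1 h2
  simp only [PySem.List.pyGetD] at this
  cases h : PySem.List.pyGet? xs c with
  | none => exfalso; rw [PySem.List.pyGet?_eq_none_iff] at h; exact h (by constructor <;> omega)
  | some a => simpa [h] using this

theorem getD_set_self {α : Type} (l : List α) (n : Nat) (v d : α) (h : n < l.length) :
    (l.set n v).getD n d = v := by
  simp [List.getD, h]

theorem getD_set_ne {α : Type} (l : List α) (n m : Nat) (v d : α) (h : m ≠ n) :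
    (l.set n v).getD m d = l.getD m d := by
  simp [List.getD, List.getElem?_set_ne (by omega : n ≠ m)]

-- stage-1, inner fold over one enumerated row: column j gains row[j-s] if positive
theorem bCell_fold (row : List Int) : ∀ (s : Nat) (cs : List (List Int)),
    s + row.length ≤ cs.length →
    ((PySem.List.enumerate row (s:Int)).foldl bCell cs).length = cs.length ∧
    ∀ j, j < cs.length →
      ((PySem.List.enumerate row (s:Int)).foldl bCell cs).getD j [] =
        cs.getD j [] ++
          (if s ≤ j ∧ j - s < row.length ∧ 0 < row.getD (j - s) 0
            then [row.getD (j - s) 0] else []) := by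
  induction row with
  | nil =>
    intro s cs _
    refine ⟨by simp [PySem.List.enumerate_nil], ?_⟩
    intro j _
    rw [if_neg (by intro h; simp at h)]
    simp [PySem.List.enumerate_nil]
  | cons x rest ih =>
    intro s cs hlen
    rw [PySem.List.enumerate_cons]
    have hs : s < cs.length := by simp at hlen; omega
    -- the state after processing cell (s, x)
    have hone : bCell cs ((s:Int), x) =
        if 0 < x then cs.set s (cs.getD s [] ++ [x]) else cs := by
      unfold bCell
      split
      · simp [PySem.List.pySetD_natCast, PySem.List.pyGetD_natCast]
      · rfl
    set cs1 := bCell cs ((s:Int), x) with hcs1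
    have hlen1 : cs1.length = cs.length := by rw [hone]; split <;> simp
    have hgs : cs1.getD s [] = cs.getD s [] ++ (if 0 < x then [x] else []) := by
      rw [hone]; split
      · rw [getD_set_self _ _ _ _ hs]
      · simp
    have hgne : ∀ j, j ≠ s → cs1.getD j [] = cs.getD j [] := by
      intro j hj
      rw [hone]; split
      · rw [getD_set_ne _ _ _ _ _ hj]
      · rfl
    have hcast : (s:Int) + 1 = ((s+1 : Nat) : Int) := by push_cast; ring
    rw [List.foldl_cons, ← hcs1, hcast]
    obtain ⟨ihl, ihg⟩ := ih (s+1) cs1 (by simp at hlen ⊢; omega)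
    refine ⟨by rw [ihl, hlen1], ?_⟩
    intro j hj
    rw [ihg j (by omega)]
    by_cases hjs : j = s
    · subst hjs
      rw [if_neg (by omega), hgs]
      simp only [Nat.sub_self, List.getD_cons_zero, List.length_cons, List.append_nil]
      congr 1
      by_cases hx : 0 < x
      · rw [if_pos hx, if_pos ⟨le_refl j, by omega, hx⟩]
      · rw [if_neg hx, if_neg (fun h => hx h.2.2)]
    · rw [hgne j hjs]
      by_cases hle : s + 1 ≤ j
      · have hsub : j - s = (j - (s+1)) + 1 := by omega
        rw [hsub]
        simp only [List.getD_cons_succ, List.length_cons]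
        congr 1
        by_cases hc : s + 1 ≤ j ∧ j - (s + 1) < rest.length ∧ 0 < rest.getD (j - (s + 1)) 0
        · rw [if_pos hc, if_pos ⟨by omega, by omega, hc.2.2⟩]
        · rw [if_neg hc, if_neg (by intro h; exact hc ⟨hle, by omega, h.2.2⟩)]
      · rw [if_neg (by omega), if_neg (by omega)]

-- stage 1 builds exactly the filtered columns (rectangular board)
theorem bBuild_spec (w : Nat) : ∀ (board : List (List Int)) (cs : List (List Int)),
    cs.length = w → (∀ row ∈ board, row.length = w) →
    (board.foldl bBuildRow cs).length = w ∧
    ∀ j, j < w → (board.foldl bBuildRow cs).getD j [] = cs.getD j [] ++ fcol board j := by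
  intro board
  induction board with
  | nil =>
    intro cs hcs _
    exact ⟨hcs, by intro j _; simp [fcol, colv]⟩
  | cons row rest ih =>
    intro cs hcs hrect
    have hrow : row.length = w := hrect row (by simp)
    obtain ⟨h1, h2⟩ := bCell_fold row 0 cs (by omega)
    have h0 : (0:Int) = ((0:Nat):Int) := by norm_num
    have hlen1 : (bBuildRow cs row).length = w := by
      unfold bBuildRow
      rw [h0, h1, hcs]
    obtain ⟨ihl, ihg⟩ := ih (bBuildRow cs row) hlen1 (fun r hr => hrect r (by simp [hr]))
    refine ⟨by simpa using ihl, ?_⟩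
    intro j hj
    rw [List.foldl_cons, ihg j hj]
    have hb : (bBuildRow cs row).getD j [] =
        cs.getD j [] ++ (if 0 ≤ j ∧ j - 0 < row.length ∧ 0 < row.getD (j - 0) 0
          then [row.getD (j - 0) 0] else []) := by
      unfold bBuildRow
      conv_lhs => rw [h0]
      rw [h2 j (by omega)]
    rw [hb, List.append_assoc]
    congr 1
    have hcv : colv (row :: rest) j = row.getD j 0 :: colv rest j := by simp [colv]
    unfold fcol
    rw [hcv, List.filter_cons]
    simp only [Nat.sub_zero]
    by_cases hx : 0 < row.getD j 0
    · rw [if_pos ⟨by omega, by omega, hx⟩, if_pos (by simpa)]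
      rfl
    · rw [if_neg (by intro h; exact hx h.2.2), if_neg (by simp [List.getD] at hx ⊢; omega)]
      simp

-- the simulation relation between A's state (filtered columns, basket, answer)
-- and B's stage-2 state (taken counters, picked dolls)
def SimRel (board : List (List Int)) (w : Nat)
    (stA : List (List Int) × List Int × Int) (stB : List Int × List Int) : Prop :=
  stA.1.length = w ∧ stB.1.length = w ∧
  stA.2.1 = stB.2.foldl bMatch [] ∧
  stA.2.2 = (stB.2.length : Int) - ((stB.2.foldl bMatch []).length : Int) ∧
  ∀ j : Nat, j < w →
    0 ≤ stB.1.getD j 0 ∧ stB.1.getD j 0 ≤ ((fcol board j).length : Int) ∧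
    stA.1.getD j [] = (fcol board j).drop (stB.1.getD j 0).toNat

-- one move preserves the simulation relation
theorem step_rel (board : List (List Int)) (w : Nat) (colsB : List (List Int))
    (hBl : colsB.length = w) (hBg : ∀ j, j < w → colsB.getD j [] = fcol board j)
    (m : Int) (hm1 : 1 - (w:Int) ≤ m) (hm2 : m ≤ w)
    (stA : List (List Int) × List Int × Int) (stB : List Int × List Int)
    (hR : SimRel board w stA stB) :
    SimRel board w (aStep stA m) (bPick colsB stB m) := by
  obtain ⟨cA, bk, ans⟩ := stA
  obtain ⟨tk, pk⟩ := stB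
  obtain ⟨hA, hB, hbas, hans, hcols⟩ := hR
  simp only at hA hB hbas hans hcols ⊢
  have h1 : -(w:Int) ≤ m - 1 := by omega
  have h2 : m - 1 < w := by omega
  set j := jnorm w (m - 1) with hjdef
  have hj : j < w := jnorm_lt w (m - 1) h1 h2
  set k := tk.getD j 0 with hkdef
  obtain ⟨hk0, hkle, hfilt⟩ := hcols j hj
  rw [← hkdef] at hk0 hkle hfilt
  have hgetA : PySem.List.pyGet? cA (m - 1) = some (cA.getD j []) :=
    pyGet?_norm cA (m-1) [] w hA h1 h2
  have hgetB : PySem.List.pyGetD tk (m - 1) 0 = k :=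
    pyGetD_norm tk (m-1) 0 w hB h1 h2
  have hgetC : PySem.List.pyGetD colsB (m - 1) [] = fcol board j := by
    rw [pyGetD_norm colsB (m-1) [] w hBl h1 h2]; exact hBg j hj
  by_cases hlt : k < ((fcol board j).length : Int)
  · -- a doll is taken: A pops the column head, B records cols[c][taken[c]]
    have hklt : k.toNat < (fcol board j).length := by omega
    have hdrop : (fcol board j).drop k.toNat =
        (fcol board j)[k.toNat] :: (fcol board j).drop (k.toNat + 1) :=
      List.drop_eq_getElem_cons hklt
    set doll := (fcol board j)[k.toNat] with hdoll
    have hdollB : PySem.List.pyGetD (fcol board j) k 0 = doll := by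
      rw [PySem.List.pyGetD_eq_getElem _ _ hk0 (by exact_mod_cast hlt)]
    have hbeq : bPick colsB (tk, pk) m = (tk.set j (k + 1), pk ++ [doll]) := by
      simp only [bPick]
      rw [hgetB, hgetC, if_pos hlt, hdollB,
        pySetD_norm tk (m-1) (k+1) w hB h1 h2]
    have hstack : (pk ++ [doll]).foldl bMatch [] = bMatch (pk.foldl bMatch []) doll := by
      rw [List.foldl_append]; rfl
    have haeq : aStep (cA, bk, ans) m =
        (cA.set j ((fcol board j).drop (k.toNat + 1)),
          (match bk with
            | top :: bs => if top = doll then (bs, ans + 2)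
                else (doll :: top :: bs, ans)
            | [] => ([doll], ans))) := by
      simp only [aStep, hgetA, hfilt, hdrop, pySetD_norm cA (m-1) _ w hA h1 h2]
      rcases bk with _ | ⟨top, bs⟩
      · rfl
      · by_cases ht : top = doll
        · simp [ht]
          rw [← hjdef]
        · simp [ht]
          rw [← hjdef]
    rw [haeq, hbeq]
    refine ⟨by simpa using hA, by simpa using hB, ?_, ?_, ?_⟩
    · -- basket = stack
      simp only [hstack, ← hbas]
      rcases bk with _ | ⟨top, bs⟩
      · rfl
      · by_cases ht : top = doll
        · simp [bMatch, ht]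
        · simp [bMatch, ht]
    · -- answer = picked - stack
      simp only [hstack, ← hbas]
      rcases bk with _ | ⟨top, bs⟩
      · have hlb := congrArg List.length hbas
        simp only [bMatch]
        simp at hans hlb ⊢
        omega
      · have hlb := congrArg List.length hbas
        by_cases ht : top = doll
        · simp only [bMatch, ht]
          simp at hans hlb ⊢
          omega
        · simp only [bMatch, if_neg ht]
          simp at hans hlb ⊢
          omega
    · intro j' hj'
      by_cases hjj : j' = j
      · subst hjj
        rw [getD_set_self _ _ _ _ (by omega), getD_set_self _ _ _ _ (by omega)]
        refine ⟨by omega, by omega, ?_⟩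
        have : (k + 1).toNat = k.toNat + 1 := by omega
        rw [this]
      · rw [getD_set_ne _ _ _ _ _ hjj, getD_set_ne _ _ _ _ _ hjj]
        exact hcols j' hj'
  · -- column exhausted: both sides skip
    have hnil : cA.getD j [] = [] := by
      rw [hfilt, List.drop_eq_nil_of_le (by omega)]
    have haeq : aStep (cA, bk, ans) m = (cA, bk, ans) := by
      simp only [aStep, hgetA, hnil]
    have hbeq : bPick colsB (tk, pk) m = (tk, pk) := by
      simp only [bPick]
      rw [hgetB, hgetC, if_neg hlt]
    rw [haeq, hbeq]
    exact ⟨hA, hB, hbas, hans, hcols⟩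

theorem fold_rel (board : List (List Int)) (w : Nat) (colsB : List (List Int))
    (hBl : colsB.length = w) (hBg : ∀ j, j < w → colsB.getD j [] = fcol board j) :
    ∀ (moves : List Int), (∀ m ∈ moves, 1 - (w:Int) ≤ m ∧ m ≤ w) →
    ∀ stA stB, SimRel board w stA stB →
    SimRel board w (moves.foldl aStep stA) (moves.foldl (bPick colsB) stB) := by
  intro moves
  induction moves with
  | nil => intro _ stA stB h; exact h
  | cons m ms ih =>
    intro hmv stA stB h
    have hm := hmv m (by simp)
    exact ih (fun x hx => hmv x (by simp [hx])) _ _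
      (step_rel board w colsB hBl hBg m hm.1 hm.2 stA stB h)

theorem minRow_aux (w : Nat) : ∀ (b : List (List Int)), b ≠ [] →
    (∀ row ∈ b, row.length = w) → pyMinRowLen b = w := by
  intro b
  induction b with
  | nil => intro h; exact absurd rfl h
  | cons r rs ih =>
    intro _ hrect
    match rs with
    | [] => simpa [pyMinRowLen] using hrect r (by simp)
    | s :: t =>
      have h1 : r.length = w := hrect r (by simp)
      have h2 : pyMinRowLen (s :: t) = w :=
        ih (by simp) (fun row hrow => hrect row (by simp [hrow]))
      simp [pyMinRowLen, h1, h2]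

theorem init_rel (board : List (List Int)) (w : Nat)
    (hw : w = (board.headD []).length) (hrect : ∀ row ∈ board, row.length = w) :
    SimRel board w (aCols board, ([], 0)) (List.replicate w (0:Int), []) := by
  have hmin : pyMinRowLen board = w := by
    match board with
    | [] => simpa [pyMinRowLen] using hw.symm
    | r :: rs => exact minRow_aux w (r :: rs) (by simp) hrect
  refine ⟨by simp [aCols, hmin], by simp, rfl, by simp, ?_⟩
  intro j hj
  refine ⟨by simp [List.getD], by simp [List.getD], ?_⟩
  have hget : (aCols board).getD j [] =
      (board.map (fun row => row.getD j 0)).filter (fun x => decide (0 < x)) := by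
    unfold aCols
    rw [hmin, List.getD_eq_getElem _ _ (by simpa using hj)]
    simp
  rw [hget]
  simp [List.getD, fcol, colv]

-- ===== VERDICT (by name: the statement is the Claim_ definition above) =====
theorem solution_spec : Claim_equal_solution := by
  intro board moves _hDom hPre
  obtain ⟨hrect, hmv⟩ := hPre
  set w := (board.headD []).length with hw
  unfold Spec_solution solution solution_alt
  obtain ⟨hBl, hBg⟩ := bBuild_spec w board (List.replicate w []) (by simp) hrect
  have hBg' : ∀ j, j < w → (board.foldl bBuildRow (List.replicate w [])).getD j [] = fcol board j := by
    intro j hj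
    rw [hBg j hj]
    simp [List.getD]
  have h := fold_rel board w (board.foldl bBuildRow (List.replicate w [])) hBl hBg'
    moves hmv (aCols board, ([], 0)) (List.replicate w (0:Int), [])
    (init_rel board w hw hrect)
  obtain ⟨-, -, -, hans, -⟩ := h
  have hw' : (board.head?.getD []).length = w := by cases board <;> rfl
  simpa [hw'] using hans
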